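-- pv_equiv track=rewrite | github.com/hugohjerten/advent-of-code | twentythree/python/nine/main.py | _find_next_sequences
-- ===== SOURCE A (Python) =====
-- History = list[int]
--
-- def _find_next_sequences(history: History) -> list[History]:
--     """Find next sequences."""
--     seqs = [history]
--     while True:
--         seqs.append([])
--         for i in range(1, len(seqs[-2])):
--             seqs[-1].append(seqs[-2][i] - seqs[-2][i - 1])
--
--         if all(val == 0 for val in seqs[-1]):
--             break
--
--     return seqs
-- ===== SOURCE B (Python) =====
-- History = list[int]
--
-- def _find_next_sequences(history: History) -> list[History]:
--     """Find next sequences (recursive, pairwise-zip differences)."""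
--     diff = [b - a for a, b in zip(history, history[1:])]
--     if any(diff):
--         return [history] + _find_next_sequences(diff)
--     return [history, diff]
-- ===== Notes on version B (the rewrite author's own statement) =====
-- stated objective: simpler
-- what changed: Replaces the explicit while-loop that mutates a growing seqs list (appending an empty row and filling it by indexed access seqs[-2][i]-seqs[-2][i-1]) with a direct recursion whose difference row is built once by zipping adjacent pairs (zip(history, history[1:])) and which recurses while any difference is nonzero.
import Mathlib
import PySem

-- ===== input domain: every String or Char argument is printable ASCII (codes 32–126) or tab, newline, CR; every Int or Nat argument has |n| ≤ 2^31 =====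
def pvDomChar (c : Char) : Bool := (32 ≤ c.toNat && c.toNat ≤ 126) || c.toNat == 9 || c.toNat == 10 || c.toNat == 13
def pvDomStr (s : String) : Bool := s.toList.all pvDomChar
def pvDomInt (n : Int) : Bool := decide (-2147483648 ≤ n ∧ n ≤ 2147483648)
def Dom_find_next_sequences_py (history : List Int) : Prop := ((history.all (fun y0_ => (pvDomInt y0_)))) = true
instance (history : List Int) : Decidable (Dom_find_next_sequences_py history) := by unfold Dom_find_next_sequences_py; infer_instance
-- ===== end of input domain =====

-- B replaces A's while-loop over a mutated, index-addressed seqs list by a direct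
-- recursion whose difference row is built by zipping adjacent pairs (objective: simpler).

-- ===== PORT A =====
-- the inner for-loop: seqs[-1].append(seqs[-2][i] - seqs[-2][i-1]) for i in range(1, len(seqs[-2]))
def pvDiffA (xs : List Int) : List Int :=
  (PySem.List.pyRange 1 (xs.length : Int) 1).foldl
    (fun acc i => acc ++ [PySem.List.pyGetD xs i 0 - PySem.List.pyGetD xs (i - 1) 0]) []

theorem pvDiffA_length_lt (xs : List Int) : (pvDiffA xs).length ≤ xs.length - 1 := by
  unfold pvDiffA
  rw [PySem.List.foldl_append_singleton_eq_map]
  simp [PySem.List.length_pyRange_one]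

-- the while True loop; cur is seqs[-2], acc the sequences collected so far
def pvLoopA (cur : List Int) (acc : List (List Int)) : List (List Int) :=
  if (pvDiffA cur).all (fun v => v == 0) then acc ++ [pvDiffA cur]
  else pvLoopA (pvDiffA cur) (acc ++ [pvDiffA cur])
termination_by cur.length
decreasing_by
  rename_i h
  have h2 : pvDiffA cur ≠ [] := fun hnil => h (by rw [hnil]; rfl)
  have h1 := pvDiffA_length_lt cur
  have h3 := List.length_pos_iff.mpr h2
  omega

def find_next_sequences_py (history : List Int) : List (List Int) :=
  pvLoopA history [history]

-- ===== PORT B =====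
-- diff = [b - a for a, b in zip(history, history[1:])]
def pvDiffB (xs : List Int) : List Int :=
  (xs.zip (PySem.List.slice xs (some 1) none)).map (fun p => p.2 - p.1)

theorem pvDiffB_length_lt (xs : List Int) : (pvDiffB xs).length ≤ xs.length - 1 := by
  simp [pvDiffB, PySem.List.slice_from_one]

def find_next_sequences_py_alt (history : List Int) : List (List Int) :=
  if (pvDiffB history).any (fun v => decide (v ≠ 0)) then
    history :: find_next_sequences_py_alt (pvDiffB history)
  else [history, pvDiffB history]
termination_by history.length
decreasing_by
  rename_i h
  have h2 : pvDiffB history ≠ [] := by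
    intro hnil; rw [hnil] at h; simp at h
  have h1 := pvDiffB_length_lt history
  have h3 := List.length_pos_iff.mpr h2
  omega

-- ===== PRECONDITION & SPEC =====
def Spec_find_next_sequences_py (history : List Int) (out : List (List Int)) : Prop := out = find_next_sequences_py_alt history
instance (history : List Int) (out : List (List Int)) : Decidable (Spec_find_next_sequences_py history out) := by unfold Spec_find_next_sequences_py; infer_instance

-- ===== CLAIM (what is proved, stated in full; the proofs are below) =====
def Claim_equal_find_next_sequences_py : Prop := ∀ (history : List Int), Dom_find_next_sequences_py history → Spec_find_next_sequences_py history (find_next_sequences_py history)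

-- ===== LEMMAS AND PROOFS =====

-- the two difference rows agree element by element
theorem pvDiffA_eq_pvDiffB (xs : List Int) : pvDiffA xs = pvDiffB xs := by
  unfold pvDiffA pvDiffB
  rw [PySem.List.foldl_append_singleton_eq_map, PySem.List.slice_from_one,
      List.nil_append]
  apply List.ext_getElem
  · simp [PySem.List.length_pyRange_one]
  · intro i h1 h2
    simp only [List.getElem_map, PySem.List.getElem_pyRange_one, List.getElem_zip,
      List.getElem_tail]
    have hl : i + 1 < xs.length := by
      simp at h2; omega
    rw [show (1 + (i : Int)) - 1 = ((i : Nat) : Int) by omega,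
        show (1 + (i : Int)) = (((i + 1 : Nat)) : Int) by omega]
    simp only [PySem.List.pyGetD_natCast]
    rw [List.getD_eq_getElem xs 0 hl, List.getD_eq_getElem xs 0 (by omega : i < xs.length)]

-- B's result always starts with its argument
theorem pvAlt_cons (xs : List Int) :
    find_next_sequences_py_alt xs = xs :: (find_next_sequences_py_alt xs).tail := by
  rw [find_next_sequences_py_alt]
  split <;> simp

-- loop invariant: A's loop appends exactly the tail of B's recursion
theorem pvLoopA_eq (cur : List Int) (acc : List (List Int)) :
    pvLoopA cur acc = acc ++ (find_next_sequences_py_alt cur).tail := by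
  induction cur, acc using pvLoopA.induct with
  | case1 cur acc hall =>
    have hd := pvDiffA_eq_pvDiffB cur
    have hb : ¬ ((pvDiffB cur).any (fun v => decide (v ≠ 0)) = true) := by
      rw [← hd]; simp at hall ⊢; exact hall
    rw [pvLoopA, find_next_sequences_py_alt, if_pos hall, if_neg hb, hd]
    simp
  | case2 cur acc hall ih =>
    have hd := pvDiffA_eq_pvDiffB cur
    have hb : (pvDiffB cur).any (fun v => decide (v ≠ 0)) = true := by
      rw [← hd]; simp at hall ⊢; exact hall
    rw [hd] at ih
    rw [pvLoopA, find_next_sequences_py_alt, if_neg hall, if_pos hb, hd, ih,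
        List.append_assoc]
    congr 1
    exact (pvAlt_cons (pvDiffB cur)).symm

-- ===== VERDICT (by name: the statement is the Claim_ definition above) =====
theorem find_next_sequences_py_spec : Claim_equal_find_next_sequences_py := by
  intro history _
  unfold Spec_find_next_sequences_py find_next_sequences_py
  rw [pvLoopA_eq]
  simpa using (pvAlt_cons history).symm
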